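-- pv_equiv track=rewrite | github.com/greetingromansoldier/bootdev-task-archive | bootdev-backend-course/bootdev-python-main/ch_8_Loops/C_2_Critical_Hit/main.py | calculate_flurry_crit
-- ===== SOURCE A (Python) =====
-- def calculate_flurry_crit(num_attacks, base_damage):
--     all_damage = 0
--     for i in range(1, (num_attacks+1)):
--         if i == num_attacks:
--             all_damage += (base_damage * 4)
--         else:
--            all_damage += (base_damage * 2)
--     return all_damage
-- ===== SOURCE B (Python) =====
-- def calculate_flurry_crit(num_attacks, base_damage):
--     if num_attacks <= 0:
--         return 0
--     return 2 * base_damage * (num_attacks - 1) + 4 * base_damage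
-- ===== Notes on version B (the rewrite author's own statement) =====
-- stated objective: faster
-- what changed: Replaced the O(n) loop over attacks with a closed-form formula 2*base*(n-1)+4*base (0 when n<=0).
import Mathlib
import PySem

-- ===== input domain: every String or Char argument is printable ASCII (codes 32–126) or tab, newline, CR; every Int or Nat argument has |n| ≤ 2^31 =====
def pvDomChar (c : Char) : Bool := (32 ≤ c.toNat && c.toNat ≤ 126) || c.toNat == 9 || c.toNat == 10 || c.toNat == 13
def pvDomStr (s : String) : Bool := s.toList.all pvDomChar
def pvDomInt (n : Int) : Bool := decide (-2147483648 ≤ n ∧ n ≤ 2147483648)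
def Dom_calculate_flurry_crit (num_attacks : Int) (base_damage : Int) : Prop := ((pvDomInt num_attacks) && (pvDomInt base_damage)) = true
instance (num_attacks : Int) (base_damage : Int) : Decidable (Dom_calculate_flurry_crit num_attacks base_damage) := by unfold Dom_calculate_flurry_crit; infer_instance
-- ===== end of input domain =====

-- B replaces A's O(n) summation loop with a closed-form O(1) formula (faster, asymptotic).


-- ===== PORT A =====
def calculate_flurry_crit (num_attacks : Int) (base_damage : Int) : Int :=
  (PySem.List.pyRange 1 (num_attacks + 1) 1).foldl
    (fun all_damage i =>
      if i = num_attacks then all_damage + base_damage * 4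
      else all_damage + base_damage * 2) 0

-- ===== PORT B =====
def calculate_flurry_crit_alt (num_attacks : Int) (base_damage : Int) : Int :=
  if num_attacks ≤ 0 then 0
  else 2 * base_damage * (num_attacks - 1) + 4 * base_damage

-- ===== PRECONDITION & SPEC =====
def Spec_calculate_flurry_crit (num_attacks : Int) (base_damage : Int) (out : Int) : Prop := out = calculate_flurry_crit_alt num_attacks base_damage
instance (num_attacks : Int) (base_damage : Int) (out : Int) : Decidable (Spec_calculate_flurry_crit num_attacks base_damage out) := by unfold Spec_calculate_flurry_crit; infer_instance

-- ===== CLAIM (what is proved, stated in full; the proofs are below) =====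
def Claim_equal_calculate_flurry_crit : Prop := ∀ (num_attacks : Int) (base_damage : Int), Dom_calculate_flurry_crit num_attacks base_damage → Spec_calculate_flurry_crit num_attacks base_damage (calculate_flurry_crit num_attacks base_damage)

-- ===== LEMMAS AND PROOFS =====

/-- Folding A's loop body over a list of indices none of which equals `n`
    just adds `base*2` per element. -/
theorem foldl_no_crit (n b : Int) (l : List Int) (acc : Int)
    (h : ∀ i ∈ l, i ≠ n) :
    l.foldl (fun all_damage i =>
      if i = n then all_damage + b * 4 else all_damage + b * 2) acc
      = acc + b * 2 * l.length := by
  induction l generalizing acc with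
  | nil => simp
  | cons x xs ih =>
    have hx : x ≠ n := h x (List.mem_cons_self)
    simp only [List.foldl_cons, if_neg hx]
    rw [ih _ (fun i hi => h i (List.mem_cons_of_mem _ hi))]
    simp only [List.length_cons]
    push_cast
    ring

theorem calculate_flurry_crit_eq (n b : Int) :
    calculate_flurry_crit n b = calculate_flurry_crit_alt n b := by
  unfold calculate_flurry_crit calculate_flurry_crit_alt
  by_cases hn : n ≤ 0
  · rw [PySem.List.pyRange_one_eq_nil (by omega)]
    simp [hn]
  · have hn' : ¬ n ≤ 0 := hn
    rw [not_le] at hn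
    rw [PySem.List.pyRange_one_append 1 n (n + 1) (by omega) (by omega),
        PySem.List.pyRange_one_singleton]
    rw [List.foldl_append]
    rw [foldl_no_crit n b _ 0 (fun i hi => by
      have := (PySem.List.mem_pyRange_one).1 hi; omega)]
    simp only [List.foldl_cons, List.foldl_nil,
      PySem.List.length_pyRange_one]
    rw [if_neg hn']
    have h1 : ((n - 1).toNat : Int) = n - 1 := by omega
    push_cast [h1]
    ring

-- ===== VERDICT (by name: the statement is the Claim_ definition above) =====
theorem calculate_flurry_crit_spec : Claim_equal_calculate_flurry_crit := by
  intro n b _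
  exact calculate_flurry_crit_eq n b
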